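-- pv_equiv track=rewrite | github.com/spsanps/nanoSmol | fVLM/scripts/estimate_flops.py | flops_query_attention
-- ===== SOURCE A (Python) =====
-- def flops_linear(in_dim, out_dim, batch=1):
--     """FLOPs for linear layer: 2 * in * out (multiply-add)"""
--     return 2 * batch * in_dim * out_dim
--
-- def flops_query_attention(num_patches, dim, num_layers=12):
--     """FLOPs for foveated query attention (cross-attention).
--
--     Query: 1 token attending to num_patches tokens.
--     Done at multiple DINO layers for deep_query=True.
--     """
--     # For each layer: Q projection (1 token), K/V projection (num_patches tokens)
--     # Attention: 1 query attending to num_patches keys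
--     total = 0
--     for _ in range(num_layers):
--         q_proj = flops_linear(dim, dim, 1)
--         kv_proj = 2 * flops_linear(dim, dim, num_patches)
--         # Attention scores: 1 * num_patches * dim (for dot product)
--         scores = 2 * 1 * num_patches * dim
--         # Weighted sum: 1 * num_patches * dim
--         weighted = 2 * 1 * num_patches * dim
--         out_proj = flops_linear(dim, dim, 1)
--         total += q_proj + kv_proj + scores + weighted + out_proj
--     return total
-- ===== SOURCE B (Python) =====
-- def flops_query_attention(num_patches, dim, num_layers=12):
--     """Closed form: every layer costs the same, so multiply one layer's cost by the layer count."""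
--     per_layer = 4 * dim * dim + 4 * num_patches * dim * dim + 4 * num_patches * dim
--     return max(num_layers, 0) * per_layer
-- ===== Notes on version B (the rewrite author's own statement) =====
-- stated objective: faster
-- what changed: Replaced the per-layer loop summing a layer-independent constant with a closed form: one layer's FLOPs times max(num_layers, 0).
import Mathlib
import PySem

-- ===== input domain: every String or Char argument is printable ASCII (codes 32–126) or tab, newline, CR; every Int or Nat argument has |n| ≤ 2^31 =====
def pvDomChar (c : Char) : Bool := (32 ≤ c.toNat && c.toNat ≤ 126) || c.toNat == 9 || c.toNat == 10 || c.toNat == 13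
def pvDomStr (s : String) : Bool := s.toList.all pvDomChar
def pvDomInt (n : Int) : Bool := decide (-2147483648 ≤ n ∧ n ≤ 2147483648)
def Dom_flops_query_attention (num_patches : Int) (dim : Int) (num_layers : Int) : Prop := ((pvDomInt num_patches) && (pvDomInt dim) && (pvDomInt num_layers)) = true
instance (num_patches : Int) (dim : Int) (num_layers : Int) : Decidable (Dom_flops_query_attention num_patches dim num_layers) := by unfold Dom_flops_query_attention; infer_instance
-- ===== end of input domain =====

-- B replaces A's per-layer loop (the summand is layer-independent) by a closed form: faster (O(1) vs O(num_layers)).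

-- ===== PORT A =====
def flops_linear (in_dim : Int) (out_dim : Int) (batch : Int) : Int :=
  2 * batch * in_dim * out_dim

def flops_query_attention (num_patches : Int) (dim : Int) (num_layers : Int) : Int :=
  (PySem.List.pyRange 0 num_layers 1).foldl
    (fun total _ =>
      let q_proj := flops_linear dim dim 1
      let kv_proj := 2 * flops_linear dim dim num_patches
      let scores := 2 * 1 * num_patches * dim
      let weighted := 2 * 1 * num_patches * dim
      let out_proj := flops_linear dim dim 1
      total + (q_proj + kv_proj + scores + weighted + out_proj)) 0

-- ===== PORT B =====
def flops_query_attention_alt (num_patches : Int) (dim : Int) (num_layers : Int) : Int :=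
  let per_layer := 4 * dim * dim + 4 * num_patches * dim * dim + 4 * num_patches * dim
  max num_layers 0 * per_layer

-- ===== PRECONDITION & SPEC =====
def Spec_flops_query_attention (num_patches : Int) (dim : Int) (num_layers : Int) (out : Int) : Prop := out = flops_query_attention_alt num_patches dim num_layers
instance (num_patches : Int) (dim : Int) (num_layers : Int) (out : Int) : Decidable (Spec_flops_query_attention num_patches dim num_layers out) := by unfold Spec_flops_query_attention; infer_instance

-- ===== CLAIM (what is proved, stated in full; the proofs are below) =====
def Claim_equal_flops_query_attention : Prop := ∀ (num_patches : Int) (dim : Int) (num_layers : Int), Dom_flops_query_attention num_patches dim num_layers → Spec_flops_query_attention num_patches dim num_layers (flops_query_attention num_patches dim num_layers)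

-- ===== LEMMAS AND PROOFS =====

/-- Folding a constant increment over any list adds `length * c` to the accumulator. -/
theorem foldl_const_add {α : Type} (c : Int) :
    ∀ (l : List α) (init : Int), l.foldl (fun t _ => t + c) init = init + l.length * c := by
  intro l
  induction l with
  | nil => intro init; simp
  | cons x xs ih =>
      intro init
      simp [List.foldl, ih]
      ring

-- ===== VERDICT (by name: the statement is the Claim_ definition above) =====
theorem flops_query_attention_spec : Claim_equal_flops_query_attention := by
  intro num_patches dim num_layers _
  unfold Spec_flops_query_attention flops_query_attention flops_query_attention_alt flops_linear
  rw [foldl_const_add]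
  rw [PySem.List.length_pyRange_one]
  have h : ((num_layers - 0).toNat : Int) = max num_layers 0 := by omega
  push_cast [h]
  ring
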